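-- pv_equiv track=rewrite | github.com/joney0715/CodingTest_Practice | Greedy/Greedy_practice/CantMakeMoney.py | solution
-- ===== SOURCE A (Python) =====
-- from itertools import combinations
--
-- def solution(Input):
--     #가진 화폐로 만들 수 있는 경우의 수
--     money = []
--     for i in range(1,len(Input)+1):
--         #가진 화페를 콤비네이션을 사용해서 뽑기
--         case = list(combinations(Input,i))
--         for j in case:
--             #뽑힌 화페의 총합
--             money.append(sum(j))
--     #1부터 차례로 가진 화폐로 만들 수 있는가 확인
--     for a in range(1,int(1e9)):
--         if a not in money:
--             answer = a
--             break
--     return answer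
-- ===== SOURCE B (Python) =====
-- def solution(Input):
--     # Subset-sum reachability set built in one pass, then count up to the first gap.
--     sums = {0}
--     for c in Input:
--         sums |= {s + c for s in sums}
--     a = 1
--     while a in sums:
--         a += 1
--     return a
-- ===== Notes on version B (the rewrite author's own statement) =====
-- stated objective: faster
-- what changed: A enumerates every nonempty combination of the coins, stores all 2^n-1 sums in a list with duplicates, and linearly scans that list for each candidate answer; B builds the set of reachable subset sums in one fold over the input (deduplicating as it goes) and counts up with O(1) set membership to the first gap.
import Mathlib
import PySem

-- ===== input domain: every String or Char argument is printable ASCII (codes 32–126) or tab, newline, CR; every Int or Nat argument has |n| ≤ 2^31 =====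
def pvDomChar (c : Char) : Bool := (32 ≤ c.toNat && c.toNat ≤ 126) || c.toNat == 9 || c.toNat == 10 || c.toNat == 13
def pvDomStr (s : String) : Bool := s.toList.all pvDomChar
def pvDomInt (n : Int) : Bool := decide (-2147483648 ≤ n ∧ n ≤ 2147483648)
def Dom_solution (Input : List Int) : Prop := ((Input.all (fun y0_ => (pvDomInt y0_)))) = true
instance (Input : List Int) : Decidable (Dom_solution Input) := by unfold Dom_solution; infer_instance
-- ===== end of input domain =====

-- B replaces A's exponential enumeration of all combination sums (a duplicate-laden list
-- scanned linearly for each candidate) by a single reachable-subset-sum SET built in one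
-- fold, then counts up to the first gap; objective: faster (deduplication + O(1)-style membership).


-- ===== PORT A =====
-- 'for a in range(1, int(1e9)): if a not in money: answer = a; break' — a bounded linear
-- search; fuel 999999999 = the number of iterations of that range.  Fuel 0 means the range
-- was exhausted without a break: Python A then raises NameError (answer unbound); the
-- sentinel 0 is returned only there, and Pre_solution excludes exactly those inputs.
def searchNotIn (money : List Int) (a : Int) : Nat → Int
  | 0 => 0
  | f + 1 => if money.contains a then searchNotIn money (a + 1) f else a

-- itertools.combinations(Input, i) is ported as List.sublistsLen i.toNat Input (the
-- library function enumerating exactly the length-i subsequences); i comes from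
-- range(1, len(Input)+1) so i ≥ 1 and i.toNat is exact.
def solution (Input : List Int) : Int :=
  let money := (PySem.List.pyRange 1 ((Input.length : Int) + 1) 1).foldl
    (fun money i => money ++ (List.sublistsLen i.toNat Input).map (fun l => l.sum)) []
  searchNotIn money 1 999999999

-- ===== PORT B =====
-- 'a = 1; while a in sums: a += 1' — the fuel 999999999 is only a termination device for
-- the while loop; under Pre_solution the first gap is reached strictly before it runs out.
def countUp (sums : PySem.Set Int) (a : Int) : Nat → Int
  | 0 => a
  | f + 1 => if PySem.Set.contains sums a then countUp sums (a + 1) f else a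

-- 'sums = {0}; for c in Input: sums |= {s + c for s in sums}'
def solution_alt (Input : List Int) : Int :=
  let sums := Input.foldl
    (fun s c => PySem.Set.union s (s.map (fun x => x + c))) (PySem.Set.ofList [0])
  countUp sums 1 999999999

-- ===== PRECONDITION & SPEC =====
-- Pre_ excludes exactly the inputs on which A's bounded search range(1, 10^9) finds no gap,
-- so A's 'answer' is never bound and A raises NameError.  The first disjunct is a cheap
-- sufficient condition (by pigeonhole, ≤ 29 coins leave a gap ≤ 2^29 < 10^9, proved in
-- exists_gap below), so Pre_ is still EXACTLY "A returns normally".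
def Pre_solution (Input : List Int) : Prop :=
  Input.length ≤ 29 ∨
    ∃ a ∈ PySem.List.pyRange 1 1000000000 1, ∀ l ∈ Input.sublists, l.sum ≠ a
instance (Input : List Int) : Decidable (Pre_solution Input) := by
  unfold Pre_solution; infer_instance

def pvWitness_solution : List Int := ([3])

def Spec_solution (Input : List Int) (out : Int) : Prop := out = solution_alt Input
instance (Input : List Int) (out : Int) : Decidable (Spec_solution Input out) := by unfold Spec_solution; infer_instance

-- ===== CLAIM (what is proved, stated in full; the proofs are below) =====
def Claim_equal_solution : Prop := ∀ (Input : List Int), Dom_solution Input → Pre_solution Input → Spec_solution Input (solution Input)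

-- ===== LEMMAS AND PROOFS =====

-- generic: membership in an append-accumulating fold
theorem mem_foldl_append (L : List Int) (g : Int → List Int) (x : Int) :
    ∀ acc : List Int, x ∈ L.foldl (fun m i => m ++ g i) acc ↔ x ∈ acc ∨ ∃ i ∈ L, x ∈ g i := by
  induction L with
  | nil => simp
  | cons c L ih =>
    intro acc
    simp only [List.foldl_cons, ih, List.mem_append, List.mem_cons]
    constructor
    · rintro (⟨h | h⟩ | ⟨i, hi, hx⟩)
      · exact Or.inl h
      · exact Or.inr ⟨c, Or.inl rfl, h⟩
      · exact Or.inr ⟨i, Or.inr hi, hx⟩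
    · rintro (h | ⟨i, (rfl | hi), hx⟩)
      · exact Or.inl (Or.inl h)
      · exact Or.inl (Or.inr hx)
      · exact Or.inr ⟨i, hi, hx⟩

-- membership in A's money list = nonempty-subsequence sums
theorem mem_moneyList (Input : List Int) (x : Int) :
    x ∈ (PySem.List.pyRange 1 ((Input.length : Int) + 1) 1).foldl
      (fun money i => money ++ (List.sublistsLen i.toNat Input).map (fun l => l.sum)) [] ↔
    ∃ l : List Int, l.Sublist Input ∧ l ≠ [] ∧ l.sum = x := by
  rw [mem_foldl_append]
  simp only [List.not_mem_nil, false_or, List.mem_map, List.mem_sublistsLen,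
    PySem.List.mem_pyRange_one]
  constructor
  · rintro ⟨i, ⟨h1, h2⟩, l, ⟨hsl, hlen⟩, hsum⟩
    refine ⟨l, hsl, ?_, hsum⟩
    intro hnil
    subst hnil
    simp at hlen
    omega
  · rintro ⟨l, hsl, hnil, hsum⟩
    refine ⟨(l.length : Int), ⟨?_, ?_⟩, l, ⟨hsl, by simp⟩, hsum⟩
    · have : l.length ≠ 0 := fun h => hnil (List.eq_nil_of_length_eq_zero h)
      omega
    · have := hsl.length_le
      omega

-- membership in B's sums set = (possibly empty) subsequence sums
theorem mem_sumsSet (Input : List Int) (x : Int) :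
    x ∈ Input.foldl (fun s c => PySem.Set.union s (s.map (fun y => y + c)))
      (PySem.Set.ofList [0]) ↔ ∃ l : List Int, l.Sublist Input ∧ l.sum = x := by
  have key : ∀ (xs : List Int) (s : PySem.Set Int) (x : Int),
      x ∈ xs.foldl (fun s c => PySem.Set.union s (s.map (fun y => y + c))) s ↔
      ∃ l : List Int, l.Sublist xs ∧ ∃ y ∈ s, y + l.sum = x := by
    intro xs
    induction xs with
    | nil =>
      intro s x
      simp only [List.foldl_nil]
      constructor
      · intro h; exact ⟨[], List.Sublist.refl _, x, h, by simp⟩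
      · rintro ⟨l, hl, y, hy, hsum⟩
        have : l = [] := List.eq_nil_of_sublist_nil hl
        subst this; simp at hsum; subst hsum; exact hy
    | cons c xs ih =>
      intro s x
      simp only [List.foldl_cons, ih]
      constructor
      · rintro ⟨l, hl, y, hy, hsum⟩
        rw [PySem.Set.mem_union] at hy
        rcases hy with hy | hy
        · exact ⟨l, hl.cons c, y, hy, hsum⟩
        · rw [List.mem_map] at hy
          obtain ⟨z, hz, rfl⟩ := hy
          exact ⟨c :: l, (List.cons_sublist_cons).mpr hl, z, hz, by
            simp only [List.sum_cons]; omega⟩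
      · rintro ⟨l, hl, y, hy, hsum⟩
        rw [List.sublist_cons_iff] at hl
        rcases hl with hl | ⟨r, rfl, hr⟩
        · exact ⟨l, hl, y, by rw [PySem.Set.mem_union]; exact Or.inl hy, hsum⟩
        · refine ⟨r, hr, y + c, ?_, ?_⟩
          · rw [PySem.Set.mem_union]
            exact Or.inr (List.mem_map.mpr ⟨y, hy, rfl⟩)
          · simp only [List.sum_cons] at hsum; omega
  rw [key]
  constructor
  · rintro ⟨l, hl, y, hy, hsum⟩
    simp only [PySem.Set.ofList] at hy
    refine ⟨l, hl, ?_⟩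
    simp at hy
    omega
  · rintro ⟨l, hl, hsum⟩
    exact ⟨l, hl, 0, by simp [PySem.Set.ofList], by omega⟩

-- the two linear searches agree as long as some gap lies within the fuel
theorem search_eq_countUp (money : List Int) (sums : PySem.Set Int) :
    ∀ (f : Nat) (a : Int), (∀ b, a ≤ b → (b ∈ money ↔ b ∈ sums)) →
    (∃ k : Nat, k < f ∧ (a + (k : Int)) ∉ money) →
    searchNotIn money a f = countUp sums a f := by
  intro f
  induction f with
  | zero =>
    rintro a _ ⟨k, hk, _⟩
    omega
  | succ f ih =>
    rintro a hmem ⟨k, hk, hnk⟩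
    by_cases hm : a ∈ money
    · have hs : a ∈ sums := (hmem a le_rfl).mp hm
      have e1 : searchNotIn money a (f + 1) = searchNotIn money (a + 1) f := by
        simp [searchNotIn, hm]
      have e2 : countUp sums a (f + 1) = countUp sums (a + 1) f := by
        simp [countUp, hs]
      rw [e1, e2]
      have hk0 : k ≠ 0 := by
        rintro rfl
        simp only [Nat.cast_zero, add_zero] at hnk
        exact hnk hm
      refine ih (a + 1) (fun b hb => hmem b (by omega)) ⟨k - 1, by omega, ?_⟩
      have : a + 1 + ((k - 1 : Nat) : Int) = a + (k : Int) := by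
        have : ((k - 1 : Nat) : Int) = (k : Int) - 1 := by omega
        omega
      rw [this]
      exact hnk
    · have hs : a ∉ sums := fun h => hm ((hmem a le_rfl).mpr h)
      simp [searchNotIn, countUp, hm, hs]

-- pigeonhole: ≤ 29 coins have at most 2^29 - 1 distinct nonzero subsequence sums,
-- so some a ∈ [1, 2^29] ⊆ [1, 10^9) is not a subsequence sum
theorem exists_gap (Input : List Int) (h : Input.length ≤ 29) :
    ∃ a : Int, 1 ≤ a ∧ a < 1000000000 ∧ ∀ l ∈ Input.sublists, l.sum ≠ a := by
  by_contra hc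
  push Not at hc
  have h29 : (2 : Int) ^ 29 = 536870912 := by norm_num
  have hpow : (2 : Int) ^ Input.length ≤ 2 ^ 29 := by
    exact pow_le_pow_right₀ (by norm_num) h
  have h0 : (0 : Int) ∈ (Input.sublists.map (fun l => l.sum)).toFinset := by
    rw [List.mem_toFinset, List.mem_map]
    exact ⟨[], List.mem_sublists.mpr (List.nil_sublist _), rfl⟩
  have hsub : Finset.Icc (1 : Int) (2 ^ Input.length) ⊆
      ((Input.sublists.map (fun l => l.sum)).toFinset).erase 0 := by
    intro a haI
    rw [Finset.mem_Icc] at haI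
    obtain ⟨l, hl, hsum⟩ := hc a haI.1 (by linarith [haI.2])
    refine Finset.mem_erase.mpr ⟨by omega, ?_⟩
    rw [List.mem_toFinset, List.mem_map]
    exact ⟨l, hl, hsum⟩
  have hle := Finset.card_le_card hsub
  have hcard1 : (Finset.Icc (1 : Int) (2 ^ Input.length)).card = 2 ^ Input.length := by
    rw [Int.card_Icc]
    have hc2 : ((2 : Int) ^ Input.length + 1 - 1) = ((2 ^ Input.length : Nat) : Int) := by
      push_cast; ring
    rw [hc2, Int.toNat_natCast]
  have hSc : (Input.sublists.map (fun l => l.sum)).toFinset.card ≤ 2 ^ Input.length :=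
    le_trans (List.toFinset_card_le _) (by simp)
  have herase := Finset.card_erase_of_mem h0
  have h1 : 1 ≤ 2 ^ Input.length := Nat.one_le_two_pow
  rw [hcard1, herase] at hle
  omega

-- ===== VERDICT (by name: the statement is the Claim_ definition above) =====
theorem solution_spec : Claim_equal_solution := by
  intro Input _ hpre
  unfold Spec_solution solution solution_alt
  apply search_eq_countUp
  · intro b hb
    rw [mem_moneyList, mem_sumsSet]
    constructor
    · rintro ⟨l, hsl, -, hsum⟩
      exact ⟨l, hsl, hsum⟩
    · rintro ⟨l, hsl, hsum⟩
      refine ⟨l, hsl, ?_, hsum⟩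
      rintro rfl
      simp at hsum
      omega
  · obtain ⟨a, ha1, ha2, hgap⟩ :
        ∃ a : Int, 1 ≤ a ∧ a < 1000000000 ∧ ∀ l ∈ Input.sublists, l.sum ≠ a := by
      rcases hpre with hlen | ⟨a, ha, hgap⟩
      · exact exists_gap Input hlen
      · rw [PySem.List.mem_pyRange_one] at ha
        exact ⟨a, ha.1, ha.2, hgap⟩
    refine ⟨(a - 1).toNat, by omega, ?_⟩
    intro hmem
    rw [mem_moneyList] at hmem
    obtain ⟨l, hsl, -, hsum⟩ := hmem
    refine hgap l (List.mem_sublists.mpr hsl) ?_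
    omega
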